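-- pv_equiv track=rewrite | github.com/Narahari917/BuyerTwin | BuyerTwin/backend/services/readiness_service.py | calculate_readiness
-- ===== SOURCE A (Python) =====
-- def calculate_readiness(events: list, buyer: dict) -> tuple[str, str]:
--     views = sum(1 for event in events if event["event_type"] == "listing_viewed")
--     saves = sum(1 for event in events if event["event_type"] == "listing_saved")
--     replies = sum(1 for event in events if event["event_type"] == "message_replied")
--     clicks = sum(1 for event in events if event["event_type"] == "message_clicked")
--
--     timeline = buyer.get("timeline", "").lower()
--
--     if replies >= 1 or ("asap" in timeline and saves >= 1):
--         return "tour ready", "schedule a tour"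
--
--     if saves >= 1 and (views >= 1 or clicks >= 1):
--         return "active consideration", "send top 3 listings"
--
--     if views >= 1 and saves == 0:
--         return "research mode", "wait and nurture"
--
--     return "follow-up needed", "follow up on saved homes"
-- ===== SOURCE B (Python) =====
-- def calculate_readiness(events: list, buyer: dict) -> tuple[str, str]:
--     viewed = saved = replied = clicked = False
--     for event in events:
--         t = event["event_type"]
--         if t == "message_replied":
--             replied = True
--         elif t == "listing_viewed":
--             viewed = True
--         elif t == "listing_saved":
--             saved = True
--         elif t == "message_clicked":
--             clicked = True
--
--     timeline = buyer.get("timeline", "").lower()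
--
--     if replied or (saved and "asap" in timeline):
--         return "tour ready", "schedule a tour"
--     if saved:
--         if viewed or clicked:
--             return "active consideration", "send top 3 listings"
--         return "follow-up needed", "follow up on saved homes"
--     if viewed:
--         return "research mode", "wait and nurture"
--     return "follow-up needed", "follow up on saved homes"
-- ===== Notes on version B (the rewrite author's own statement) =====
-- stated objective: simpler
-- what changed: B replaces A's four counting scans with a single pass maintaining four boolean presence flags (the branches only ever test count>=1 / ==0), and restructures the branch cascade around nesting on the 'saved' flag.
import Mathlib
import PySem

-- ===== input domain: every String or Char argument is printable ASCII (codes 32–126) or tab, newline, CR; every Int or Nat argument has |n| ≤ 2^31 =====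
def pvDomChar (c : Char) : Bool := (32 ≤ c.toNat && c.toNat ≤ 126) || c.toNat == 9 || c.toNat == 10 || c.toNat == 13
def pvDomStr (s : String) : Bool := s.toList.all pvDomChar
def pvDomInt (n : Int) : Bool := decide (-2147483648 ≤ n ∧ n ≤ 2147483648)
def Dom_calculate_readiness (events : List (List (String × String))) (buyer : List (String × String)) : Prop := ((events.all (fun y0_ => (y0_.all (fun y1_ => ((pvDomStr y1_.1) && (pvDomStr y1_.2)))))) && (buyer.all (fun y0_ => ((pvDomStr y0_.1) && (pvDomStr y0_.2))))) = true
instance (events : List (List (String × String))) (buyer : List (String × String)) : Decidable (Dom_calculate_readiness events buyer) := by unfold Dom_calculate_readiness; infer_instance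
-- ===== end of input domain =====

-- B replaces A's four counting scans with one pass of boolean presence flags and a restructured branch cascade.


-- ===== PORT A =====
-- event["event_type"]: total form via getD; Pre_ guarantees the key is present (Python raises KeyError otherwise)
def pvEventType (e : List (String × String)) : String :=
  (PySem.Dict.ofList e).getD "event_type" ""

def calculate_readiness (events : List (List (String × String))) (buyer : List (String × String)) : String × String :=
  let views := events.foldl (fun acc event => acc + if pvEventType event == "listing_viewed" then 1 else 0) (0 : Int)
  let saves := events.foldl (fun acc event => acc + if pvEventType event == "listing_saved" then 1 else 0) (0 : Int)
  let replies := events.foldl (fun acc event => acc + if pvEventType event == "message_replied" then 1 else 0) (0 : Int)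
  let clicks := events.foldl (fun acc event => acc + if pvEventType event == "message_clicked" then 1 else 0) (0 : Int)
  let timeline := PySem.Str.lower ((PySem.Dict.ofList buyer).getD "timeline" "")
  if replies ≥ 1 || (PySem.Str.isIn "asap" timeline && saves ≥ 1) then
    ("tour ready", "schedule a tour")
  else if saves ≥ 1 && (views ≥ 1 || clicks ≥ 1) then
    ("active consideration", "send top 3 listings")
  else if views ≥ 1 && saves == 0 then
    ("research mode", "wait and nurture")
  else
    ("follow-up needed", "follow up on saved homes")

-- ===== PORT B =====
-- the loop body of Source B: update the (viewed, saved, replied, clicked) flags from one event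
def pvFlagStep (s : Bool × Bool × Bool × Bool) (event : List (String × String)) : Bool × Bool × Bool × Bool :=
  let t := pvEventType event
  if t == "message_replied" then (s.1, s.2.1, true, s.2.2.2)
  else if t == "listing_viewed" then (true, s.2.1, s.2.2.1, s.2.2.2)
  else if t == "listing_saved" then (s.1, true, s.2.2.1, s.2.2.2)
  else if t == "message_clicked" then (s.1, s.2.1, s.2.2.1, true)
  else s

def calculate_readiness_alt (events : List (List (String × String))) (buyer : List (String × String)) : String × String :=
  let st := events.foldl pvFlagStep (false, false, false, false)
  let viewed := st.1
  let saved := st.2.1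
  let replied := st.2.2.1
  let clicked := st.2.2.2
  let timeline := PySem.Str.lower ((PySem.Dict.ofList buyer).getD "timeline" "")
  if replied || (saved && PySem.Str.isIn "asap" timeline) then
    ("tour ready", "schedule a tour")
  else if saved then
    if viewed || clicked then ("active consideration", "send top 3 listings")
    else ("follow-up needed", "follow up on saved homes")
  else if viewed then
    ("research mode", "wait and nurture")
  else
    ("follow-up needed", "follow up on saved homes")

-- ===== PRECONDITION & SPEC =====
-- Pre_ excludes events without an "event_type" key, on which both A and B raise KeyError.
def Pre_calculate_readiness (events : List (List (String × String))) (buyer : List (String × String)) : Prop :=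
  ∀ e ∈ events, (PySem.Dict.ofList e).contains "event_type" = true
instance (events : List (List (String × String))) (buyer : List (String × String)) : Decidable (Pre_calculate_readiness events buyer) := by unfold Pre_calculate_readiness; infer_instance
def pvWitness_calculate_readiness : (List (List (String × String))) × (List (String × String)) :=
  ([[("event_type", "listing_viewed")]], [("timeline", "ASAP")])

def Spec_calculate_readiness (events : List (List (String × String))) (buyer : List (String × String)) (out : String × String) : Prop := out = calculate_readiness_alt events buyer
instance (events : List (List (String × String))) (buyer : List (String × String)) (out : String × String) : Decidable (Spec_calculate_readiness events buyer out) := by unfold Spec_calculate_readiness; infer_instance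

-- ===== CLAIM (what is proved, stated in full; the proofs are below) =====
def Claim_equal_calculate_readiness : Prop := ∀ (events : List (List (String × String))) (buyer : List (String × String)), Dom_calculate_readiness events buyer → Pre_calculate_readiness events buyer → Spec_calculate_readiness events buyer (calculate_readiness events buyer)

-- ===== LEMMAS AND PROOFS =====

-- B's flag fold computes, in each component, "initial flag OR some event has that type".
lemma flags_spec (events : List (List (String × String))) (s : Bool × Bool × Bool × Bool) :
    events.foldl pvFlagStep s =
      (s.1 || events.any (fun e => pvEventType e == "listing_viewed"),
       s.2.1 || events.any (fun e => pvEventType e == "listing_saved"),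
       s.2.2.1 || events.any (fun e => pvEventType e == "message_replied"),
       s.2.2.2 || events.any (fun e => pvEventType e == "message_clicked")) := by
  induction events generalizing s with
  | nil => obtain ⟨v, sv, r, c⟩ := s; simp
  | cons e t ih =>
    obtain ⟨v, sv, r, c⟩ := s
    simp only [List.foldl_cons, List.any_cons, ih, pvFlagStep]
    rcases h1 : pvEventType e == "message_replied" with _ | _ <;>
    rcases h2 : pvEventType e == "listing_viewed" with _ | _ <;>
    rcases h3 : pvEventType e == "listing_saved" with _ | _ <;>
    rcases h4 : pvEventType e == "message_clicked" with _ | _ <;>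
      simp [h1, h2, h3, h4] <;>
      · simp only [beq_iff_eq] at h1 h2 h3 h4
        simp_all

-- A's 0/1-counting scan is the integer cast of countP.
lemma scan_count (events : List (List (String × String))) (k : String) :
    events.foldl (fun acc event => acc + if pvEventType event == k then 1 else 0) (0 : Int)
      = ((events.countP (fun e => pvEventType e == k) : Nat) : Int) := by
  rw [PySem.List.foldl_add, PySem.List.sum_map_ite_one_zero, zero_add]

lemma count_ge_one (p : List (String × String) → Bool) (l : List (List (String × String))) :
    (decide (((l.countP p : Nat) : Int) ≥ 1)) = l.any p := by
  rcases h : l.any p with _ | _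
  · have h0 : l.countP p = 0 := List.countP_eq_zero.mpr (by simpa [List.any_eq_false] using h)
    simp [h0]
  · have h1 : 0 < l.countP p := by
      rw [List.countP_pos_iff]
      simpa [List.any_eq_true] using h
    simp only [ge_iff_le, decide_eq_true_eq]
    exact_mod_cast h1

lemma count_eq_zero (p : List (String × String) → Bool) (l : List (List (String × String))) :
    ((((l.countP p : Nat) : Int)) == 0) = !(l.any p) := by
  rcases h : l.any p with _ | _
  · have h0 : l.countP p = 0 := List.countP_eq_zero.mpr (by simpa [List.any_eq_false] using h)
    simp [h0]
  · have h1 : 0 < l.countP p := by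
      rw [List.countP_pos_iff]
      simpa [List.any_eq_true] using h
    simpa using h1.ne' 

-- ===== VERDICT (by name: the statement is the Claim_ definition above) =====
theorem calculate_readiness_spec : Claim_equal_calculate_readiness := by
  intro events buyer _ _
  unfold Spec_calculate_readiness calculate_readiness calculate_readiness_alt
  simp only [scan_count, flags_spec, Bool.false_or, count_ge_one, count_eq_zero]
  rcases hv : events.any (fun e => pvEventType e == "listing_viewed") with _ | _ <;>
  rcases hs : events.any (fun e => pvEventType e == "listing_saved") with _ | _ <;>
  rcases hr : events.any (fun e => pvEventType e == "message_replied") with _ | _ <;>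
  rcases hc : events.any (fun e => pvEventType e == "message_clicked") with _ | _ <;>
  rcases ht : PySem.Str.isIn "asap" (PySem.Str.lower ((PySem.Dict.ofList buyer).getD "timeline" "")) with _ | _ <;>
    simp [hv, hs, hr, hc, ht]
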